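-- pv_equiv track=rewrite | github.com/ResearchgroupMITI/swallow-detection | evaluation/eval_ml_method.py | find_groups_of_ones
-- ===== SOURCE A (Python) =====
-- def find_groups_of_ones(binary_array, min_distance):
--     groups = []
--     start = None
--     for i, bit in enumerate(binary_array):
--         if bit == 1:
--             if start is None:
--                 start = i
--         else:
--             if start is not None:
--                 groups.append((start, i - 1))
--                 start = None
--
--     # Check if there's a group ending at the last index
--     if start is not None:
--         groups.append((start, len(binary_array) - 1))
--
--     # Merge adjacent groups that are below the minimum distance
--     merged_groups = []
--     if groups:
--         merged_groups.append(groups[0])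
--         for group in groups[1:]:
--             if group[0] - merged_groups[-1][1] <= min_distance:
--                 merged_groups[-1] = (merged_groups[-1][0], group[1])
--             else:
--                 merged_groups.append(group)
--
--     return merged_groups
-- ===== SOURCE B (Python) =====
-- def find_groups_of_ones(binary_array, min_distance):
--     merged = []
--     start = None
--
--     def close(end):
--         # merge the run (start, end) into the result immediately
--         if merged and start - merged[-1][1] <= min_distance:
--             merged[-1] = (merged[-1][0], end)
--         else:
--             merged.append((start, end))
--
--     for i, bit in enumerate(binary_array):
--         if bit == 1:
--             if start is None:
--                 start = i
--         elif start is not None: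
--             close(i - 1)
--             start = None
--
--     if start is not None:
--         close(len(binary_array) - 1)
--
--     return merged
-- ===== Notes on version B (the rewrite author's own statement) =====
-- stated objective: simpler
-- what changed: Fuses A's two passes (collect all runs of ones, then merge nearby runs) into a single pass that merges each run into the result the moment it closes, so the intermediate groups list disappears.
import Mathlib
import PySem

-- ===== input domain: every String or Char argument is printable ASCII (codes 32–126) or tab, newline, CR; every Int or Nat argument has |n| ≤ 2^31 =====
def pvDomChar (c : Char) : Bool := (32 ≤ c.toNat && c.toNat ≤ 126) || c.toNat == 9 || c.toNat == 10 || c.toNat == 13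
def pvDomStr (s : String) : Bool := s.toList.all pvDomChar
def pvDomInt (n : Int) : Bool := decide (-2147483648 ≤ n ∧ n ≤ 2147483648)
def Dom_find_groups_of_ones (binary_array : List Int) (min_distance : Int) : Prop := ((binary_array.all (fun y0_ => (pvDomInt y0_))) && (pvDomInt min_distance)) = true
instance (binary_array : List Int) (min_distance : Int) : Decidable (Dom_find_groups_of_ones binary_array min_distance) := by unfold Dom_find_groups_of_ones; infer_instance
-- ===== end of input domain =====

-- B fuses A's two passes (collect runs of ones, then merge nearby runs) into one pass
-- that merges each run into the result as soon as it closes; objective: simpler.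


-- ===== PORT A =====
-- first pass of A: collect (start, end) runs of ones, threading (groups, start)
def pvScanA : List Int → Int → List (Int × Int) → Option Int → (List (Int × Int) × Option Int)
  | [], _, groups, start => (groups, start)
  | bit :: rest, i, groups, start =>
    if bit = 1 then
      pvScanA rest (i + 1) groups (match start with | none => some i | some s => some s)
    else
      match start with
      | some s => pvScanA rest (i + 1) (groups ++ [(s, i - 1)]) none
      | none => pvScanA rest (i + 1) groups none

-- one step of A's merge loop: merge `group` into `merged_groups`
def pvMergeA (md : Int) (merged : List (Int × Int)) (g : Int × Int) : List (Int × Int) :=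
  match merged.getLast? with
  | none => merged ++ [g]
  | some last => if g.1 - last.2 ≤ md then merged.dropLast ++ [(last.1, g.2)] else merged ++ [g]

def find_groups_of_ones (binary_array : List Int) (min_distance : Int) : List (Int × Int) :=
  let p := pvScanA binary_array 0 [] none
  let groups := match p.2 with
    | some s => p.1 ++ [(s, (binary_array.length : Int) - 1)]
    | none => p.1
  match groups with
  | [] => []
  | g :: rest => rest.foldl (pvMergeA min_distance) [g]

-- ===== PORT B =====
-- B's `close`: merge the just-closed run (s, e) into the result immediately
def pvCloseB (md : Int) (merged : List (Int × Int)) (s e : Int) : List (Int × Int) :=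
  match merged.getLast? with
  | some last => if s - last.2 ≤ md then merged.dropLast ++ [(last.1, e)] else merged ++ [(s, e)]
  | none => merged ++ [(s, e)]

-- B's single pass, threading (merged, start)
def pvScanB (md : Int) : List Int → Int → List (Int × Int) → Option Int → (List (Int × Int) × Option Int)
  | [], _, merged, start => (merged, start)
  | bit :: rest, i, merged, start =>
    if bit = 1 then
      pvScanB md rest (i + 1) merged (match start with | none => some i | some s => some s)
    else
      match start with
      | some s => pvScanB md rest (i + 1) (pvCloseB md merged s (i - 1)) none
      | none => pvScanB md rest (i + 1) merged none

def find_groups_of_ones_alt (binary_array : List Int) (min_distance : Int) : List (Int × Int) :=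
  let p := pvScanB min_distance binary_array 0 [] none
  match p.2 with
  | some s => pvCloseB min_distance p.1 s ((binary_array.length : Int) - 1)
  | none => p.1

-- ===== PRECONDITION & SPEC =====
def Spec_find_groups_of_ones (binary_array : List Int) (min_distance : Int) (out : List (Int × Int)) : Prop := out = find_groups_of_ones_alt binary_array min_distance
instance (binary_array : List Int) (min_distance : Int) (out : List (Int × Int)) : Decidable (Spec_find_groups_of_ones binary_array min_distance out) := by unfold Spec_find_groups_of_ones; infer_instance

-- ===== CLAIM (what is proved, stated in full; the proofs are below) =====
def Claim_equal_find_groups_of_ones : Prop := ∀ (binary_array : List Int) (min_distance : Int), Dom_find_groups_of_ones binary_array min_distance → Spec_find_groups_of_ones binary_array min_distance (find_groups_of_ones binary_array min_distance)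

-- ===== LEMMAS AND PROOFS =====

-- B's close step is exactly A's merge step
theorem pvCloseB_eq_mergeA (md : Int) (m : List (Int × Int)) (s e : Int) :
    pvCloseB md m s e = pvMergeA md m (s, e) := by
  unfold pvCloseB pvMergeA
  cases m.getLast? <;> rfl

-- folding A's merge step from [] over groups ++ [g] = one more step
theorem foldl_mergeA_append (md : Int) (gs : List (Int × Int)) (g : Int × Int) :
    (gs ++ [g]).foldl (pvMergeA md) [] = pvMergeA md (gs.foldl (pvMergeA md) []) g := by
  simp [List.foldl_append]

-- A's merge loop equals folding the merge step from the empty list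
theorem mergeA_eq_foldl (md : Int) (gs : List (Int × Int)) :
    (match gs with
     | [] => ([] : List (Int × Int))
     | g :: rest => rest.foldl (pvMergeA md) [g]) = gs.foldl (pvMergeA md) [] := by
  cases gs with
  | nil => rfl
  | cons g rest =>
    have h : pvMergeA md [] g = [g] := rfl
    simp [List.foldl, h]

-- main invariant: B's scan carries the merged version of A's scanned groups
theorem scan_inv (md : Int) (xs : List Int) : ∀ (i : Int) (groups : List (Int × Int)) (start : Option Int),
    pvScanB md xs i (groups.foldl (pvMergeA md) []) start
      = ((pvScanA xs i groups start).1.foldl (pvMergeA md) [], (pvScanA xs i groups start).2) := by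
  induction xs with
  | nil => intro i groups start; rfl
  | cons bit rest ih =>
    intro i groups start
    by_cases hb : bit = 1
    · simp [pvScanA, pvScanB, hb, ih]
    · cases start with
      | none => simp [pvScanA, pvScanB, hb, ih]
      | some s =>
        simp only [pvScanA, pvScanB, if_neg hb]
        rw [pvCloseB_eq_mergeA, ← foldl_mergeA_append, ih]

-- ===== VERDICT (by name: the statement is the Claim_ definition above) =====
theorem find_groups_of_ones_spec : Claim_equal_find_groups_of_ones := by
  intro ba md _
  unfold Spec_find_groups_of_ones find_groups_of_ones find_groups_of_ones_alt
  have h := scan_inv md ba 0 [] none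
  simp only [List.foldl_nil] at h
  rw [h]
  cases hs : (pvScanA ba 0 [] none).2 with
  | none => simp only [hs, mergeA_eq_foldl]
  | some s =>
    simp only [hs, mergeA_eq_foldl]
    rw [pvCloseB_eq_mergeA, ← foldl_mergeA_append]
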